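-- pv_equiv track=rewrite | github.com/BraPil/Agentic-AI-Architect | src/api/rest.py | _filter_frameworks
-- ===== SOURCE A (Python) =====
-- def _filter_frameworks(
--     frameworks: list[dict[str, str]],
--     search: str | None,
--     trajectory: str | None,
--     status_2024: str | None,
-- ) -> list[dict[str, str]]:
--     """Filter framework rows using lightweight server-side predicates."""
--     filtered = frameworks
--
--     if search:
--         needle = search.strip().lower()
--         filtered = [
--             row for row in filtered
--             if needle in " ".join(row.values()).lower()
--         ]
--
--     if trajectory:
--         expected = trajectory.strip().lower()
--         filtered = [
--             row for row in filtered
--             if expected in row.get("2026 Trajectory", "").lower()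
--         ]
--
--     if status_2024:
--         expected = status_2024.strip().lower()
--         filtered = [
--             row for row in filtered
--             if expected in row.get("2024 Status", "").lower()
--         ]
--
--     return filtered
-- ===== SOURCE B (Python) =====
-- def _filter_frameworks(
--     frameworks: list[dict[str, str]],
--     search: str | None,
--     trajectory: str | None,
--     status_2024: str | None,
-- ) -> list[dict[str, str]]:
--     """Single pass: collect the active predicates, then filter once."""
--     preds = []
--     if search:
--         needle = search.strip().lower()
--         preds.append(lambda row: needle in " ".join(row.values()).lower())
--     if trajectory:
--         expected_t = trajectory.strip().lower()
--         preds.append(lambda row: expected_t in row.get("2026 Trajectory", "").lower())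
--     if status_2024:
--         expected_s = status_2024.strip().lower()
--         preds.append(lambda row: expected_s in row.get("2024 Status", "").lower())
--     if not preds:
--         return frameworks
--     return [row for row in frameworks if all(p(row) for p in preds)]
-- ===== Notes on version B (the rewrite author's own statement) =====
-- stated objective: alternative
-- what changed: B normalizes the three optional filters into a list of active predicates up front and makes a single filtering pass over frameworks with a conjoined condition, instead of A's three successive list comprehensions over shrinking intermediate lists.
import Mathlib
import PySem

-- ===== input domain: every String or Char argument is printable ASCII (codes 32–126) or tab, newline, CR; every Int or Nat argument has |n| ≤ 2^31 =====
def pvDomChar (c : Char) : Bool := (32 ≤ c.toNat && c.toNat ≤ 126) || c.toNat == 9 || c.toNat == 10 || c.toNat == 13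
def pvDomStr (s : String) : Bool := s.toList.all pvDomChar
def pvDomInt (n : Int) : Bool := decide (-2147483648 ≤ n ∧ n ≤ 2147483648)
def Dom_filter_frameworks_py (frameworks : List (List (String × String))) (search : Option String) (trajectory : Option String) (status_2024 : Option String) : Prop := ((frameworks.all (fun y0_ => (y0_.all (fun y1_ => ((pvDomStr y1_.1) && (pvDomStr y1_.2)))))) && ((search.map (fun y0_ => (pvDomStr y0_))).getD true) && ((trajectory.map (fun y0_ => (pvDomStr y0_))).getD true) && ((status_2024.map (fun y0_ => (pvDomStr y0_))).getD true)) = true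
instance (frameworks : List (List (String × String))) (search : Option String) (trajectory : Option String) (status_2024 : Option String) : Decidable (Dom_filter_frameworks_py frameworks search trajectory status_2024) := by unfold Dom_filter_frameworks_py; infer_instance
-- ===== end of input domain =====

-- B (single pass with a pre-built active-predicate list) vs A (three successive comprehensions); objective: alternative decomposition, equal cost.

-- ===== PORT A =====
-- Python truthiness of a `str | None` value: None and "" are falsy
def pvTruthy (o : Option String) : Bool :=
  match o with
  | none => false
  | some s => s != ""

-- needle in " ".join(row.values()).lower()
def pvSearchHit (needle : String) (row : List (String × String)) : Bool :=
  PySem.Str.isIn needle (PySem.Str.lower (PySem.Str.join " " (PySem.Dict.ofList row).values))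

-- expected in row.get(key, "").lower()
def pvKeyHit (expected key : String) (row : List (String × String)) : Bool :=
  PySem.Str.isIn expected (PySem.Str.lower ((PySem.Dict.ofList row).getD key ""))

def filter_frameworks_py (frameworks : List (List (String × String))) (search : Option String) (trajectory : Option String) (status_2024 : Option String) : List (List (String × String)) :=
  let filtered := frameworks
  let filtered :=
    if pvTruthy search then
      let needle := PySem.Str.lower (PySem.Str.strip (search.getD ""))
      filtered.filter (fun row => pvSearchHit needle row)
    else filtered
  let filtered :=
    if pvTruthy trajectory then
      let expected := PySem.Str.lower (PySem.Str.strip (trajectory.getD ""))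
      filtered.filter (fun row => pvKeyHit expected "2026 Trajectory" row)
    else filtered
  let filtered :=
    if pvTruthy status_2024 then
      let expected := PySem.Str.lower (PySem.Str.strip (status_2024.getD ""))
      filtered.filter (fun row => pvKeyHit expected "2024 Status" row)
    else filtered
  filtered

-- ===== PORT B =====
def filter_frameworks_py_alt (frameworks : List (List (String × String))) (search : Option String) (trajectory : Option String) (status_2024 : Option String) : List (List (String × String)) :=
  let preds : List (List (String × String) → Bool) :=
    (if pvTruthy search then
      [fun row => pvSearchHit (PySem.Str.lower (PySem.Str.strip (search.getD ""))) row]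
     else []) ++
    (if pvTruthy trajectory then
      [fun row => pvKeyHit (PySem.Str.lower (PySem.Str.strip (trajectory.getD ""))) "2026 Trajectory" row]
     else []) ++
    (if pvTruthy status_2024 then
      [fun row => pvKeyHit (PySem.Str.lower (PySem.Str.strip (status_2024.getD ""))) "2024 Status" row]
     else [])
  if preds.isEmpty then frameworks
  else frameworks.filter (fun row => preds.all (fun p => p row))

-- ===== PRECONDITION & SPEC =====
def Spec_filter_frameworks_py (frameworks : List (List (String × String))) (search : Option String) (trajectory : Option String) (status_2024 : Option String) (out : List (List (String × String))) : Prop := out = filter_frameworks_py_alt frameworks search trajectory status_2024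
instance (frameworks : List (List (String × String))) (search : Option String) (trajectory : Option String) (status_2024 : Option String) (out : List (List (String × String))) : Decidable (Spec_filter_frameworks_py frameworks search trajectory status_2024 out) := by unfold Spec_filter_frameworks_py; infer_instance

-- ===== CLAIM (what is proved, stated in full; the proofs are below) =====
def Claim_equal_filter_frameworks_py : Prop := ∀ (frameworks : List (List (String × String))) (search : Option String) (trajectory : Option String) (status_2024 : Option String), Dom_filter_frameworks_py frameworks search trajectory status_2024 → Spec_filter_frameworks_py frameworks search trajectory status_2024 (filter_frameworks_py frameworks search trajectory status_2024)

-- ===== LEMMAS AND PROOFS =====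

-- ===== VERDICT (by name: the statement is the Claim_ definition above) =====
set_option maxHeartbeats 1000000 in
theorem filter_frameworks_py_spec : Claim_equal_filter_frameworks_py := by
  intro fr search traj st _
  unfold Spec_filter_frameworks_py filter_frameworks_py filter_frameworks_py_alt
  cases hs : pvTruthy search <;> cases ht : pvTruthy traj <;> cases hq : pvTruthy st <;>
    simp [List.filter_filter, List.all_cons, List.all_nil] <;>
    (apply List.filter_congr; intro a _;
     simp [Bool.and_comm, Bool.and_assoc])
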